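-- pv_equiv track=rewrite | github.com/RamiroVeloz/Facultad | 2do/SL/Practica/Practica 2/Ej9.py | analize_text
-- ===== SOURCE A (Python) =====
-- import string
--
-- def calculate_score (letter):
--     scores = {'A' : 1,'E' : 1,'I': 1,'O' : 1,'U' : 1,'N' : 1,'R' : 1,'S' : 1,'T' : 1,
--     'D' : 2,'G' : 2,
--     'B' : 3,'C' : 3,'M' : 3,'P' : 3,
--     'F' : 4,'H' : 4,'V' : 4,'W' : 4,'Y' : 4,
--     'K' : 5,
--     'J' : 8,'X' : 8,
--     'Q' : 10,'Z' : 10}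
--
--     point = 0
--
--     if (letter in scores):
--         point = scores[letter]
--
--     return point
--
-- def analize_text (text):
--     points = 0
--     not_char = string.digits + string.punctuation + ' '
--     for letter in text:
--         letter = letter.upper()
--         if not (letter in not_char):
--             aux = calculate_score(letter)
--             points += aux
--     return points
-- ===== SOURCE B (Python) =====
-- # Scores grouped by point value; scan the score table, not the text.
-- GROUPS = [(1, 'AEIOUNRST'), (2, 'DG'), (3, 'BCMP'), (4, 'FHVWY'),
--           (5, 'K'), (8, 'JX'), (10, 'QZ')]
--
--
-- def analize_text(text):
--     # For each score group, count occurrences of each of its letters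
--     # (either case) in the text; non-letters are simply never counted.
--     return sum(s * sum(text.count(ch) + text.count(ch.lower()) for ch in letters)
--                for s, letters in GROUPS)
-- ===== Notes on version B (the rewrite author's own statement) =====
-- stated objective: faster
-- what changed: B replaces A's per-character scan (which rebuilds the scores dict for every character and tests a redundant not_char guard) with a scan over a score-grouped letter table: for each score group it counts occurrences of each of its letters (upper and lower case) in the text with str.count and sums score * count; non-letters never contribute, so the guard disappears.
import Mathlib
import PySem

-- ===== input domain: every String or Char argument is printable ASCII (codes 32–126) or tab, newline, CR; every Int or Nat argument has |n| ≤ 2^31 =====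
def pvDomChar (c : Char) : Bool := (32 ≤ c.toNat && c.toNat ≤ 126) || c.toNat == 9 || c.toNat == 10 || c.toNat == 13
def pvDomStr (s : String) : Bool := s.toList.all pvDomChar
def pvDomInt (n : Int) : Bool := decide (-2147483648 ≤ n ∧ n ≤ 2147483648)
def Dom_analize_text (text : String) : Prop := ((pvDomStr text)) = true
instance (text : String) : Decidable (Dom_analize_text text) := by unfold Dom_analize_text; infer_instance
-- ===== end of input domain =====

-- B scans a score-grouped letter table and counts each letter (either case) in the
-- text with str.count, instead of A's per-character scan that rebuilds the scores
-- dict for every character; same values, a different traversal; a timing run measured B faster (objective: faster).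

-- ===== PORT A =====
-- the dict literal built inside calculate_score
def pvScoresA : PySem.Dict Char Int := PySem.Dict.ofList
  [('A', 1), ('E', 1), ('I', 1), ('O', 1), ('U', 1), ('N', 1), ('R', 1), ('S', 1), ('T', 1),
   ('D', 2), ('G', 2),
   ('B', 3), ('C', 3), ('M', 3), ('P', 3),
   ('F', 4), ('H', 4), ('V', 4), ('W', 4), ('Y', 4),
   ('K', 5),
   ('J', 8), ('X', 8),
   ('Q', 10), ('Z', 10)]

-- letters are single characters on the ASCII domain, so the parameter is a Char
def calculate_score (letter : Char) : Int :=
  let scores := pvScoresA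
  let point : Int := 0
  if scores.contains letter then scores.getD letter 0 else point

-- string.digits + string.punctuation + ' '
def pvNotChar : List Char := "0123456789!\"#$%&'()*+,-./:;<=>?@[\\]^_`{|}~ ".toList

-- 'letter in not_char' on a one-character letter is exactly list membership on the ASCII domain
def analize_text (text : String) : Int :=
  text.toList.foldl
    (fun points letter =>
      let letter := PySem.Chars.upperChar letter
      if !(pvNotChar.contains letter) then points + calculate_score letter else points)
    0

-- ===== PORT B =====
def GROUPS : List (Int × List Char) :=
  [(1, "AEIOUNRST".toList), (2, "DG".toList), (3, "BCMP".toList), (4, "FHVWY".toList),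
   (5, "K".toList), (8, "JX".toList), (10, "QZ".toList)]

def analize_text_alt (text : String) : Int :=
  (GROUPS.map (fun g =>
    g.1 * ((g.2.map (fun ch =>
      ((PySem.Str.count text (String.ofList [ch]) : Int)
        + (PySem.Str.count text (String.ofList [PySem.Chars.lowerChar ch]) : Int)))).sum))).sum

-- ===== PRECONDITION & SPEC =====
def Spec_analize_text (text : String) (out : Int) : Prop := out = analize_text_alt text
instance (text : String) (out : Int) : Decidable (Spec_analize_text text out) := by unfold Spec_analize_text; infer_instance

-- ===== CLAIM (what is proved, stated in full; the proofs are below) =====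
def Claim_equal_analize_text : Prop := ∀ (text : String), Dom_analize_text text → Spec_analize_text text (analize_text text)

-- ===== LEMMAS AND PROOFS =====

-- every character of not_char scores 0, so A's guard is dead
set_option maxRecDepth 4096 in
lemma calculate_score_notChar : ∀ u ∈ pvNotChar, calculate_score u = 0 := by
  have h : pvNotChar.all (fun u => calculate_score u == 0) = true := by rfl
  intro u hu
  simpa using List.all_eq_true.mp h u hu

-- A's loop is the sum of the per-character scores
lemma analize_text_eq_sum (text : String) :
    analize_text text =
      (text.toList.map (fun c => calculate_score (PySem.Chars.upperChar c))).sum := by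
  unfold analize_text
  have hfun :
      (fun (points : Int) (letter : Char) =>
        let letter := PySem.Chars.upperChar letter
        if !(pvNotChar.contains letter) then points + calculate_score letter else points)
      = fun (points : Int) (letter : Char) =>
          points + calculate_score (PySem.Chars.upperChar letter) := by
    funext points letter
    by_cases hmem : PySem.Chars.upperChar letter ∈ pvNotChar
    · simp [hmem, calculate_score_notChar _ hmem]
    · simp [hmem]
  rw [hfun, PySem.List.foldl_add _ _ 0, zero_add]

-- Python's text.count of a one-character string is the character count of the list
lemma count_go_single (c : Char) (l : List Char) (n : Nat) :
    PySem.Chars.count.go [c] l.length l n = n + List.count c l := by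
  induction l generalizing n with
  | nil => simp [PySem.Chars.count.go]
  | cons h t ih =>
    unfold PySem.Chars.count.go
    by_cases hc : c = h
    · subst hc
      simp [List.isPrefixOf, ih]
      omega
    · simp [List.isPrefixOf, hc, Ne.symm hc, ih]

lemma chars_count_single (l : List Char) (c : Char) :
    PySem.Chars.count l [c] = l.count c := by
  simp [PySem.Chars.count]
  simpa using count_go_single c l 0

-- the contribution of one character to B's table scan
def pvCharScore (c : Char) : Int :=
  (GROUPS.map (fun g =>
    g.1 * ((g.2.map (fun ch =>
      (((if c = ch then 1 else 0) : Int)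
        + (if c = PySem.Chars.lowerChar ch then 1 else 0)))).sum))).sum

-- B over the character list
def pvBsum (l : List Char) : Int :=
  (GROUPS.map (fun g =>
    g.1 * ((g.2.map (fun ch =>
      ((l.count ch : Int) + (l.count (PySem.Chars.lowerChar ch) : Int)))).sum))).sum

lemma sum_map_add {α : Type} (l : List α) (f g : α → Int) :
    (l.map (fun x => f x + g x)).sum = (l.map f).sum + (l.map g).sum := by
  induction l with
  | nil => simp
  | cons h t ih => simp [ih]; ring

lemma pvBsum_cons (c : Char) (l : List Char) :
    pvBsum (c :: l) = pvCharScore c + pvBsum l := by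
  unfold pvBsum pvCharScore
  rw [← sum_map_add]
  refine congrArg List.sum (List.map_congr_left ?_)
  intro g _
  rw [← mul_add]
  refine congrArg (g.1 * ·) ?_
  rw [← sum_map_add]
  refine congrArg List.sum (List.map_congr_left ?_)
  intro ch _
  simp [List.count_cons]
  ring

-- pvBsum is the sum of per-character contributions
lemma pvBsum_eq_sum (l : List Char) : pvBsum l = (l.map pvCharScore).sum := by
  induction l with
  | nil => simp [pvBsum]
  | cons c t ih => simp [pvBsum_cons, ih]

lemma analize_text_alt_eq_pvBsum (text : String) :
    analize_text_alt text = pvBsum text.toList := by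
  unfold analize_text_alt pvBsum
  simp [chars_count_single]

-- on the ASCII domain, one character's table contribution is exactly A's score of its upper case
set_option maxRecDepth 6000 in
lemma pvCharScore_eq (c : Char) (h : pvDomChar c = true) :
    pvCharScore c = calculate_score (PySem.Chars.upperChar c) := by
  have key : ∀ n ∈ List.range 127,
      pvCharScore (Char.ofNat n) = calculate_score (PySem.Chars.upperChar (Char.ofNat n)) := by
    decide
  have hlt : c.toNat < 127 := by
    simp [pvDomChar] at h
    omega
  have := key c.toNat (List.mem_range.mpr hlt)
  simpa [Char.ofNat_toNat] using this

-- ===== VERDICT (by name: the statement is the Claim_ definition above) =====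
theorem analize_text_spec : Claim_equal_analize_text := by
  intro text hdom
  unfold Spec_analize_text
  rw [analize_text_eq_sum, analize_text_alt_eq_pvBsum, pvBsum_eq_sum]
  refine congrArg List.sum (List.map_congr_left ?_).symm
  intro c hc
  exact pvCharScore_eq c (List.all_eq_true.mp hdom c hc)
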